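-- pv_equiv track=rewrite | github.com/Evgeniy202/AT_5 | task_7.py | task_7
-- ===== SOURCE A (Python) =====
-- def task_7(nums, k):
--     n = len(nums)
--     dp = [0] * n
--     result = nums[0]
--
--     for i in range(n):
--         max_sum = 0
--         for j in range(1, k + 1):
--             if i - j >= 0:
--                 max_sum = max(max_sum, dp[i - j])
--         dp[i] = max(max_sum, 0) + nums[i]
--         result = max(result, dp[i])
--
--     return result
-- ===== SOURCE B (Python) =====
-- def task_7(nums, k):
--     # Sliding-window maximum over dp via a two-stack max-queue: amortized O(1)
--     # per element instead of A's O(k) rescan of dp.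
--     kn = k if k > 0 else 0
--     result = nums[0]
--     ins = []   # back stack: (value, max of this stack)
--     outs = []  # front stack: (value, max of this stack)
--     for i, x in enumerate(nums):
--         # queue must hold dp[j] for max(0, i-kn) <= j <= i-1: drop the expired front
--         if i > kn:
--             if not outs:
--                 while ins:
--                     v, _ = ins.pop()
--                     m = v if not outs else max(v, outs[-1][1])
--                     outs.append((v, m))
--             outs.pop()
--         m = 0
--         if ins:
--             m = max(m, ins[-1][1])
--         if outs:
--             m = max(m, outs[-1][1])
--         cur = m + x
--         ins.append((cur, cur if not ins else max(cur, ins[-1][1])))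
--         result = max(result, cur)
--     return result
-- ===== Notes on version B (the rewrite author's own statement) =====
-- stated objective: faster
-- what changed: replaced A's O(k) inner rescan of dp for each element by a sliding-window maximum maintained incrementally with a two-stack max-queue (amortized O(1) per element)
import Mathlib
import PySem

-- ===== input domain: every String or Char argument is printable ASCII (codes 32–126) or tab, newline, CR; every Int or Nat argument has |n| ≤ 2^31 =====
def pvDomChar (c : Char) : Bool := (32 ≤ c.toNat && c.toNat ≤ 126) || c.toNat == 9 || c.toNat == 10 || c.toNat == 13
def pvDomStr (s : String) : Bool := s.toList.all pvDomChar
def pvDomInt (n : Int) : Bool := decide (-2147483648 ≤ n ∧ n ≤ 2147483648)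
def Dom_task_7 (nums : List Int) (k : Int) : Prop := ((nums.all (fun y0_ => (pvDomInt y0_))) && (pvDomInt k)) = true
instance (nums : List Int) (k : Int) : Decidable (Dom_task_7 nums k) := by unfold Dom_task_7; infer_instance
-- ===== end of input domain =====

-- B replaces A's O(k) inner rescan of dp by a two-stack max-queue sliding-window maximum.

-- ===== PORT A =====
-- one iteration of A's outer 'for i in range(n)' loop over the state (dp, result)
def task7Step (nums : List Int) (k : Int) (st : List Int × Int) (i : Int) : List Int × Int :=
  let dp := st.1
  -- inner 'for j in range(1, k+1)' accumulating max_sum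
  let max_sum := (PySem.List.pyRange 1 (k + 1) 1).foldl
      (fun ms j => if 0 ≤ i - j then max ms (PySem.List.pyGetD dp (i - j) 0) else ms) 0
  -- dp[i-j] and nums[i] always in range when read (0 ≤ i-j < i < n), so the total getD form is exact
  let dpi := max max_sum 0 + PySem.List.pyGetD nums i 0
  (PySem.List.pySetD dp i dpi, max st.2 dpi)

def task_7 (nums : List Int) (k : Int) : Int :=
  let n : Int := nums.length
  let dp := List.replicate nums.length (0 : Int)
  -- nums[0]: Python raises IndexError on []; Pre_task_7 excludes that input
  let result := (PySem.List.pyGet? nums 0).getD 0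
  ((PySem.List.pyRange 0 n 1).foldl (task7Step nums k) (dp, result)).2

-- ===== PORT B =====
-- stacks are Lean lists with the TOP at the HEAD (Python appends/pops at the end)
-- 'm if not s else max(m, s[-1][1])': fold the stack's stored top maximum into m
def topMax (s : List (Int × Int)) (m : Int) : Int :=
  match s with | [] => m | (_, mi) :: _ => max m mi

-- 'while ins: v,_ = ins.pop(); outs.append((v, v if not outs else max(v, outs[-1][1])))'
def bPopAll : List (Int × Int) → List (Int × Int) → List (Int × Int)
  | [], outs => outs
  | (v, _) :: rest, outs => bPopAll rest ((v, topMax outs v) :: outs)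

-- one iteration of B's 'for i, x in enumerate(nums)' over the state (result, ins, outs)
def bStep (kn : Int) (st : Int × List (Int × Int) × List (Int × Int)) (ix : Int × Int) :
    Int × List (Int × Int) × List (Int × Int) :=
  let res := st.1
  let ins := st.2.1
  let outs := st.2.2
  let i := ix.1
  let x := ix.2
  -- the expiry branch 'if i > kn: (move if outs empty); outs.pop()', written as the
  -- parallel update of the two stacks; outs.pop() is .tail — the queue holds kn+1 ≥ 1
  -- elements whenever i > kn, so Python's pop never hits an empty list here
  let ins1 := if kn < i then (if outs.isEmpty then [] else ins) else ins
  let outs1 := if kn < i then (if outs.isEmpty then bPopAll ins [] else outs).tail else outs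
  -- 'm = 0; if ins: m = max(m, ins[-1][1]); if outs: m = max(m, outs[-1][1])'
  let cur := topMax outs1 (topMax ins1 0) + x
  let ins2 := (cur, topMax ins1 cur) :: ins1
  (max res cur, ins2, outs1)

def task_7_alt (nums : List Int) (k : Int) : Int :=
  let kn : Int := if 0 < k then k else 0
  -- nums[0]: Python raises IndexError on []; Pre_task_7 excludes that input
  let result := (PySem.List.pyGet? nums 0).getD 0
  ((PySem.List.enumerate nums 0).foldl (bStep kn) (result, [], [])).1

-- ===== PRECONDITION & SPEC =====
-- Pre_ excludes only the empty list, on which the Python A (and B) raises IndexError at nums[0]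
def Pre_task_7 (nums : List Int) (k : Int) : Prop := nums ≠ []
instance (nums : List Int) (k : Int) : Decidable (Pre_task_7 nums k) := by
  unfold Pre_task_7; infer_instance

def pvWitness_task_7 : List Int × Int := ([3, -1, 4, -2, 5], 2)

def Spec_task_7 (nums : List Int) (k : Int) (out : Int) : Prop := out = task_7_alt nums k
instance (nums : List Int) (k : Int) (out : Int) : Decidable (Spec_task_7 nums k out) := by
  unfold Spec_task_7; infer_instance

-- ===== CLAIM (what is proved, stated in full; the proofs are below) =====
def Claim_equal_task_7 : Prop := ∀ (nums : List Int) (k : Int),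
  Dom_task_7 nums k → Pre_task_7 nums k → Spec_task_7 nums k (task_7 nums k)

-- ===== LEMMAS AND PROOFS =====

-- the common reference: dp built as a list, window max recomputed from the dp suffix
def refStep (kn : Nat) (st : List Int × Int) (x : Int) : List Int × Int :=
  let cur := (st.1.drop (st.1.length - kn)).foldl max 0 + x
  (st.1 ++ [cur], max st.2 cur)

-- max folds: hoisting lemmas
theorem foldl_max_pull (t : List Int) (a b : Int) :
    t.foldl max (max a b) = max a (t.foldl max b) := by
  induction t generalizing b with
  | nil => rfl
  | cons x xs ih => simpa [List.foldl, max_assoc] using ih (max b x)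

theorem foldl_max_reverse (t : List Int) (a : Int) :
    t.reverse.foldl max a = t.foldl max a := by
  induction t generalizing a with
  | nil => rfl
  | cons x xs ih =>
      simp [List.foldl_append, List.foldl, ih]
      rw [max_comm a x, foldl_max_pull, max_comm]

theorem foldl_max_seed (t : List Int) (a b : Int) :
    t.foldl max (max a b) = max (t.foldl max b) a := by
  rw [foldl_max_pull, max_comm]

theorem foldr_max_eq (t : List Int) (a : Int) :
    t.foldr (fun x y => max y x) a = t.foldl max a := by
  rw [← List.foldl_reverse, foldl_max_reverse]

theorem foldl_max_zero_seed (t : List Int) (v : Int) :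
    max 0 (t.foldl max v) = max (t.foldl max 0) v := by
  rw [← foldl_max_pull t 0 v, max_comm 0 v, foldl_max_seed]

theorem foldl_max_nonneg (t : List Int) : 0 ≤ t.foldl max 0 :=
  (PySem.List.le_foldl_max t 0).1

-- ===== A-side =====
-- A's inner loop over j computes the max (with 0) of the last min(i,k) already-filled dp slots
theorem innerLoop_eq_window (kq : Nat) (L Z : List Int) :
    (PySem.List.pyRange 1 ((kq : Int) + 1) 1).foldl
      (fun ms j => if 0 ≤ (L.length : Int) - j
        then max ms (PySem.List.pyGetD (L ++ Z) ((L.length : Int) - j) 0) else ms) 0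
    = (L.drop (L.length - kq)).foldl max 0 := by
  induction kq with
  | zero =>
      rw [show ((0 : Nat) : Int) + 1 = 1 by norm_num, PySem.List.pyRange_one_eq_nil le_rfl]
      simp
  | succ kq ih =>
      have hsplit : PySem.List.pyRange 1 (((kq + 1 : Nat) : Int) + 1) 1
          = PySem.List.pyRange 1 ((kq : Int) + 1) 1 ++ [(kq : Int) + 1] := by
        push_cast
        exact PySem.List.pyRange_one_succ_right (by omega)
      rw [hsplit, List.foldl_append, ih]
      simp only [List.foldl_cons, List.foldl_nil]
      by_cases h : kq + 1 ≤ L.length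
      · rw [if_pos (by push_cast; omega)]
        have h1 : (L.length : Int) - ((kq : Int) + 1) = ((L.length - (kq + 1) : Nat) : Int) := by
          push_cast; omega
        have hlt : L.length - (kq + 1) < L.length := by omega
        have hv : PySem.List.pyGetD (L ++ Z) ((L.length : Int) - ((kq : Int) + 1)) 0
            = L[L.length - (kq + 1)]'hlt := by
          rw [h1, PySem.List.pyGetD_natCast, List.getD_eq_getElem?_getD,
            List.getElem?_append_left hlt, List.getElem?_eq_getElem hlt]
          rfl
        rw [hv, List.drop_eq_getElem_cons hlt,
          show L.length - (kq + 1) + 1 = L.length - kq by omega,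
          List.foldl_cons, foldl_max_pull, foldl_max_zero_seed]
      · rw [if_neg (by push_cast; omega),
          show L.length - (kq + 1) = L.length - kq by omega]

theorem innerLoop_eq_window_int (k : Int) (L Z : List Int) :
    (PySem.List.pyRange 1 (k + 1) 1).foldl
      (fun ms j => if 0 ≤ (L.length : Int) - j
        then max ms (PySem.List.pyGetD (L ++ Z) ((L.length : Int) - j) 0) else ms) 0
    = (L.drop (L.length - k.toNat)).foldl max 0 := by
  rcases le_or_gt k 0 with hk | hk
  · rw [PySem.List.pyRange_one_eq_nil (by omega), show k.toNat = 0 from by omega]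
    simp
  · have h := innerLoop_eq_window k.toNat L Z
    rw [show ((k.toNat : Nat) : Int) = k from by omega] at h
    exact h

theorem set_append_replicate_succ (L : List Int) (m : Nat) (c : Int) :
    (L ++ List.replicate (m + 1) (0 : Int)).set L.length c = (L ++ [c]) ++ List.replicate m 0 := by
  rw [List.replicate_succ]
  simp

theorem task7Step_eval (nums : List Int) (k : Int) (L : List Int) (m : Nat) (r : Int)
    (hin : L.length < nums.length) :
    task7Step nums k (L ++ List.replicate (m + 1) 0, r) (L.length : Int)
    = ((L ++ [(L.drop (L.length - k.toNat)).foldl max 0 + nums[L.length]]) ++ List.replicate m 0,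
        max r ((L.drop (L.length - k.toNat)).foldl max 0 + nums[L.length])) := by
  simp only [task7Step]
  rw [innerLoop_eq_window_int k L (List.replicate (m + 1) 0)]
  rw [max_eq_left (foldl_max_nonneg _)]
  rw [PySem.List.pyGetD_natCast, List.getD_eq_getElem?_getD, List.getElem?_eq_getElem hin,
    Option.getD_some]
  rw [PySem.List.pySetD_natCast, set_append_replicate_succ]

theorem aLoop (nums : List Int) (k : Int) :
    ∀ (m i : Nat) (L : List Int) (r : Int), L.length = i → i + m = nums.length →
    ((PySem.List.pyRange (i : Int) (nums.length : Int) 1).foldl (task7Step nums k)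
        (L ++ List.replicate m 0, r)).2
    = ((nums.drop i).foldl (refStep k.toNat) (L, r)).2 := by
  intro m
  induction m with
  | zero =>
      intro i L r hL hlen
      rw [PySem.List.pyRange_one_eq_nil (by omega), show i = nums.length from by omega]
      simp
  | succ m ihm =>
      intro i L r hL hlen
      have hin : i < nums.length := by omega
      rw [PySem.List.pyRange_one_cons (by exact_mod_cast hin), List.foldl_cons]
      subst hL
      rw [task7Step_eval nums k L m r hin]
      rw [List.drop_eq_getElem_cons hin, List.foldl_cons]
      have hstep : refStep k.toNat (L, r) nums[L.length]
          = (L ++ [(L.drop (L.length - k.toNat)).foldl max 0 + nums[L.length]],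
              max r ((L.drop (L.length - k.toNat)).foldl max 0 + nums[L.length])) := rfl
      rw [hstep]
      have := ihm (L.length + 1)
        (L ++ [(L.drop (L.length - k.toNat)).foldl max 0 + nums[L.length]])
        (max r ((L.drop (L.length - k.toNat)).foldl max 0 + nums[L.length]))
        (by simp) (by omega)
      rw [show ((L.length : Int) + 1) = ((L.length + 1 : Nat) : Int) from by push_cast; ring]
      exact this

theorem a_eq_ref (nums : List Int) (k : Int) :
    task_7 nums k = (nums.foldl (refStep k.toNat) ([], (PySem.List.pyGet? nums 0).getD 0)).2 := by
  have h := aLoop nums k nums.length 0 [] ((PySem.List.pyGet? nums 0).getD 0) rfl (by omega)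
  simp only [List.nil_append, List.drop_zero, Nat.cast_zero] at h
  simp only [task_7]
  exact h

-- ===== B-side =====
-- canonical max-tagged stack over a list of values (top first)
def stackOf : List Int → List (Int × Int)
  | [] => []
  | v :: vs => (v, vs.foldl max v) :: stackOf vs

theorem stackOf_push (x : Int) (vs : List Int) :
    (x, topMax (stackOf vs) x) :: stackOf vs = stackOf (x :: vs) := by
  cases vs with
  | nil => rfl
  | cons w ws => simp [stackOf, topMax, List.foldl, foldl_max_pull]

theorem bPopAll_stackOf (vs ws : List Int) :
    bPopAll (stackOf vs) (stackOf ws) = stackOf (vs.reverse ++ ws) := by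
  induction vs generalizing ws with
  | nil => rfl
  | cons v vs ih =>
      show bPopAll (stackOf (v :: vs)) (stackOf ws) = _
      rw [stackOf]
      show bPopAll (stackOf vs) ((v, topMax (stackOf ws) v) :: stackOf ws) = _
      rw [stackOf_push, ih]
      simp

theorem queue_max (iv ov : List Int) :
    topMax (stackOf ov) (topMax (stackOf iv) 0)
    = (ov ++ iv.reverse).foldl max 0 := by
  cases iv with
  | nil =>
      cases ov with
      | nil => rfl
      | cons w ws => simp [stackOf, topMax, List.foldl, foldl_max_pull]
  | cons v vs =>
      cases ov with
      | nil =>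
          simp [stackOf, topMax, foldr_max_eq]
          exact foldl_max_zero_seed vs v
      | cons w ws =>
          simp only [stackOf, topMax]
          rw [List.foldl_append, foldl_max_reverse]
          rw [show (v :: vs).foldl max ((w :: ws).foldl max 0)
                = vs.foldl max (max ((w :: ws).foldl max 0) v) from rfl,
              foldl_max_seed,
              show (w :: ws).foldl max 0 = ws.foldl max (max 0 w) from rfl,
              foldl_max_pull]
          simp [max_comm, max_left_comm, max_assoc]

theorem stackOf_tail (vs : List Int) : (stackOf vs).tail = stackOf vs.tail := by
  cases vs <;> rfl

theorem bLoop (k : Int) :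
    ∀ (rest : List Int) (i : Nat) (iv ov L : List Int) (r : Int),
    L.length = i → ov ++ iv.reverse = L.drop (i - (k.toNat + 1)) →
    ((PySem.List.enumerate rest (i : Int)).foldl (bStep (k.toNat : Int))
        (r, stackOf iv, stackOf ov)).1
    = (rest.foldl (refStep k.toNat) (L, r)).2 := by
  set kn := k.toNat with hkn
  intro rest
  induction rest with
  | nil => intro i iv ov L r hL hQ; rfl
  | cons x rest ih =>
      intro i iv ov L r hL hQ
      subst hL
      rw [PySem.List.enumerate_cons, List.foldl_cons, List.foldl_cons]
      -- the state after the expiry branch: stacks of value lists iv1, ov1 holding the window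
      obtain ⟨iv1, ov1, e1, e2, h3⟩ :
          ∃ iv1 ov1,
            (if (kn : Int) < (L.length : Int)
              then (if (stackOf ov).isEmpty then [] else stackOf iv) else stackOf iv)
              = stackOf iv1 ∧
            (if (kn : Int) < (L.length : Int)
              then (if (stackOf ov).isEmpty then bPopAll (stackOf iv) [] else stackOf ov).tail
              else stackOf ov)
              = stackOf ov1 ∧
            ov1 ++ iv1.reverse = L.drop (L.length - kn) := by
        by_cases hc : kn < L.length
        · have hci : (kn : Int) < (L.length : Int) := by exact_mod_cast hc
          have htail : (L.drop (L.length - (kn + 1))).tail = L.drop (L.length - kn) := by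
            rw [List.tail_drop]
            congr 1
            omega
          cases ov with
          | nil =>
              refine ⟨[], iv.reverse.tail, ?_, ?_, ?_⟩
              · rw [if_pos hci]; rfl
              · rw [if_pos hci]
                show (bPopAll (stackOf iv) (stackOf [])).tail = _
                rw [bPopAll_stackOf, List.append_nil, stackOf_tail]
              · simp only [List.nil_append] at hQ
                rw [← htail, ← hQ]
                simp
          | cons w ws =>
              refine ⟨iv, ws, ?_, ?_, ?_⟩
              · rw [if_pos hci]; rfl
              · rw [if_pos hci]; rfl
              · rw [← htail, ← hQ]
                rfl
        · have hci : ¬ (kn : Int) < (L.length : Int) := by exact_mod_cast hc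
          refine ⟨iv, ov, if_neg hci, if_neg hci, ?_⟩
          rw [hQ]
          congr 1
          omega
      have hstep : bStep (kn : Int) (r, stackOf iv, stackOf ov) ((L.length : Int), x)
          = (max r ((L.drop (L.length - kn)).foldl max 0 + x),
             stackOf (((L.drop (L.length - kn)).foldl max 0 + x) :: iv1), stackOf ov1) := by
        simp only [bStep]
        rw [e1, e2, queue_max iv1 ov1, h3, stackOf_push]
      rw [hstep]
      have hrs : refStep kn (L, r) x
          = (L ++ [(L.drop (L.length - kn)).foldl max 0 + x],
             max r ((L.drop (L.length - kn)).foldl max 0 + x)) := rfl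
      rw [hrs]
      have hQ' : ov1 ++ (((L.drop (L.length - kn)).foldl max 0 + x) :: iv1).reverse
          = (L ++ [(L.drop (L.length - kn)).foldl max 0 + x]).drop
              ((L.length + 1) - (kn + 1)) := by
        rw [List.reverse_cons, ← List.append_assoc, h3,
          show (L.length + 1) - (kn + 1) = L.length - kn from by omega,
          List.drop_append_of_le_length (by omega)]
      have := ih (L.length + 1) (((L.drop (L.length - kn)).foldl max 0 + x) :: iv1) ov1
        (L ++ [(L.drop (L.length - kn)).foldl max 0 + x])
        (max r ((L.drop (L.length - kn)).foldl max 0 + x)) (by simp) hQ'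
      rw [show ((L.length : Int) + 1) = ((L.length + 1 : Nat) : Int) from by push_cast; ring]
      exact this

theorem b_eq_ref (nums : List Int) (k : Int) :
    task_7_alt nums k
    = (nums.foldl (refStep k.toNat) ([], (PySem.List.pyGet? nums 0).getD 0)).2 := by
  have hkn : (if 0 < k then k else 0) = (k.toNat : Int) := by split_ifs <;> omega
  have h := bLoop k nums 0 [] [] [] ((PySem.List.pyGet? nums 0).getD 0) rfl (by simp)
  simp only [Nat.cast_zero] at h
  simp only [task_7_alt, hkn]
  exact h

-- ===== VERDICT (by name: the statement is the Claim_ definition above) =====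
theorem task_7_spec : Claim_equal_task_7 := by
  intro nums k _ _
  unfold Spec_task_7
  rw [a_eq_ref, b_eq_ref]
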